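-- pv_equiv track=rewrite | github.com/Kasiet2001/leetcode | maximize_y_sum_by_picking_triplet_of_distinct_x_values.py | maxSumDistinctTriplet
-- ===== SOURCE A (Python) =====
-- def maxSumDistinctTriplet(x, y):
--     if len(set(x)) < 3:
--         return -1
--     vals = dict()
--     for i, num in enumerate(x):
--         if num in vals:
--             vals[num] = max(vals[num], y[i])
--         else:
--             vals[num] = y[i]
--     max_vals = sorted(vals.values())
--     return max_vals[-1] + max_vals[-2] + max_vals[-3]
-- ===== SOURCE B (Python) =====
-- def maxSumDistinctTriplet(x, y):
--     best = {}
--     for xi, yi in zip(x, y):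
--         if xi not in best or best[xi] < yi:
--             best[xi] = yi
--     if len(best) < 3:
--         return -1
--     a = b = c = None
--     for v in best.values():
--         if a is None or v > a:
--             a, b, c = v, a, b
--         elif b is None or v > b:
--             b, c = v, b
--         elif c is None or v > c:
--             c = v
--     return a + b + c
-- ===== Notes on version B (the rewrite author's own statement) =====
-- stated objective: faster
-- what changed: B replaces A's full sort of the per-x maxima by a single pass that keeps only the three largest values (and builds the dict over zip(x, y) with conditional writes instead of enumerate plus max-reassignment); Pre_ excludes only the inputs where A raises IndexError (at least 3 distinct x values but y shorter than x).
import Mathlib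
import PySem

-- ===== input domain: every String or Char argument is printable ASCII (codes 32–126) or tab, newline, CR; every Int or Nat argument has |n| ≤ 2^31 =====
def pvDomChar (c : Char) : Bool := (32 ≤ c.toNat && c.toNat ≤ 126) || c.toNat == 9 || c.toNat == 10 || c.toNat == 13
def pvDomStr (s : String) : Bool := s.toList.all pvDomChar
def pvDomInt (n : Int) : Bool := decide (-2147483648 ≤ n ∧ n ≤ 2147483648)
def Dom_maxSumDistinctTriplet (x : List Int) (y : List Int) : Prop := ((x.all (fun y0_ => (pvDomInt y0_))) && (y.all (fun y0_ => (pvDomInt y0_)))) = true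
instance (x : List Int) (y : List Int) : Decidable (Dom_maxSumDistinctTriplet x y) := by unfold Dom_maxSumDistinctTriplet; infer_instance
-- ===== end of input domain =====

-- B replaces A's full sort of the per-x maxima by a single pass keeping the three largest values (objective: faster, no sort).

-- ===== PORT A =====
-- Python two-argument max(a, b)
def pyMax2 (a b : Int) : Int := if a < b then b else a

-- one iteration of A's dict-building loop: vals[num] = max(vals[num], y[i]) / vals[num] = y[i]
-- (y[i] is total-form pyGetD: under Pre_ the index is always in range)
def aStep (y : List Int) (d : PySem.Dict Int Int) (p : Int × Int) : PySem.Dict Int Int :=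
  if d.contains p.2 then d.insert p.2 (pyMax2 (d.getD p.2 0) (PySem.List.pyGetD y p.1 0))
  else d.insert p.2 (PySem.List.pyGetD y p.1 0)

def maxSumDistinctTriplet (x : List Int) (y : List Int) : Int :=
  if (PySem.Set.ofList x).length < 3 then -1
  else
    let vals := (PySem.List.enumerate x 0).foldl (aStep y) PySem.Dict.empty
    let maxVals := PySem.List.sorted vals.values (fun v => v) false
    PySem.List.pyGetD maxVals (-1) 0 + PySem.List.pyGetD maxVals (-2) 0 + PySem.List.pyGetD maxVals (-3) 0

-- ===== PORT B =====
-- one iteration of B's loop: if xi not in best or best[xi] < yi: best[xi] = yi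
def bStep (d : PySem.Dict Int Int) (p : Int × Int) : PySem.Dict Int Int :=
  if !d.contains p.1 || d.getD p.1 0 < p.2 then d.insert p.1 p.2 else d

-- one iteration of B's top-three loop over (a, b, c), each None or an int
def top3Step (st : Option Int × Option Int × Option Int) (v : Int) :
    Option Int × Option Int × Option Int :=
  if (match st.1 with | none => true | some a => decide (a < v)) then (some v, st.1, st.2.1)
  else if (match st.2.1 with | none => true | some b => decide (b < v)) then (st.1, some v, st.2.1)
  else if (match st.2.2 with | none => true | some c => decide (c < v)) then (st.1, st.2.1, some v)
  else st

def maxSumDistinctTriplet_alt (x : List Int) (y : List Int) : Int :=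
  let best := (x.zip y).foldl bStep PySem.Dict.empty
  if best.size < 3 then -1
  else
    -- a, b, c can no longer be None here (≥ 3 values), so 'a + b + c' is the total form .getD 0
    let st := best.values.foldl top3Step (none, none, none)
    st.1.getD 0 + st.2.1.getD 0 + st.2.2.getD 0

-- ===== PRECONDITION & SPEC =====
-- Pre_ excludes exactly the inputs where A raises IndexError: at least 3 distinct x values but y shorter than x (A reads y[i] for every index i of x).
def Pre_maxSumDistinctTriplet (x : List Int) (y : List Int) : Prop :=
  3 ≤ (PySem.Set.ofList x).length → x.length ≤ y.length
instance (x : List Int) (y : List Int) : Decidable (Pre_maxSumDistinctTriplet x y) := by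
  unfold Pre_maxSumDistinctTriplet; infer_instance
def pvWitness_maxSumDistinctTriplet : List Int × List Int := ([1, 2, 1, 3], [5, 9, 7, 2])

def Spec_maxSumDistinctTriplet (x : List Int) (y : List Int) (out : Int) : Prop := out = maxSumDistinctTriplet_alt x y
instance (x : List Int) (y : List Int) (out : Int) : Decidable (Spec_maxSumDistinctTriplet x y out) := by unfold Spec_maxSumDistinctTriplet; infer_instance

-- ===== CLAIM (what is proved, stated in full; the proofs are below) =====
def Claim_equal_maxSumDistinctTriplet : Prop := ∀ (x : List Int) (y : List Int), Dom_maxSumDistinctTriplet x y → Pre_maxSumDistinctTriplet x y → Spec_maxSumDistinctTriplet x y (maxSumDistinctTriplet x y)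

-- ===== LEMMAS AND PROOFS =====
-- (proof-only helpers: the loop state of B's top-three pass as a list, and its invariant)

def stL (st : Option Int × Option Int × Option Int) : List Int :=
  ([st.1, st.2.1, st.2.2]).filterMap id

def TInv (m : List Int) (st : Option Int × Option Int × Option Int) : Prop :=
  (st.2.1.isSome → st.1.isSome) ∧ (st.2.2.isSome → st.2.1.isSome) ∧
  (stL st).length = min m.length 3 ∧
  (stL st).Pairwise (fun p q => q ≤ p) ∧
  ∃ rest : List Int, m.Perm (stL st ++ rest) ∧ ∀ r ∈ rest, ∀ e ∈ stL st, r ≤ e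

theorem insert_self_eq {d : PySem.Dict Int Int} {k v : Int}
    (hnd : d.keys.Nodup) (h : d.get? k = some v) : d.insert k v = d := by
  have hc : d.contains k = true := by rw [PySem.Dict.contains_eq_isSome_get?, h]; rfl
  apply PySem.Dict.ext
  rw [PySem.Dict.items_insert_of_contains d v hc]
  conv_rhs => rw [← List.map_id d.items]
  apply List.map_congr_left
  intro p hp
  obtain ⟨p1, p2⟩ := p
  by_cases hk : p1 = k
  · have := PySem.Dict.get?_of_mem_items d (by simpa [hk] using hp) hnd
    rw [this] at h
    have hv : p2 = v := by injection h
    simp [hk, hv]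
  · simp [hk]

theorem step_eq (y : List Int) (d : PySem.Dict Int Int) (p : Int × Int)
    (hnd : d.keys.Nodup) :
    aStep y d p = bStep d (p.2, PySem.List.pyGetD y p.1 0) := by
  unfold aStep bStep pyMax2
  set w := PySem.List.pyGetD y p.1 0
  by_cases hc : d.contains p.2
  · simp only [hc, if_pos, Bool.not_true, Bool.false_or]
    by_cases hlt : d.getD p.2 0 < w
    · simp [hlt]
    · simp only [hlt, if_neg, decide_eq_true_eq]
      rw [if_neg (by simpa using hlt)]
      apply insert_self_eq hnd
      rw [PySem.Dict.getD_eq_get?_getD] at *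
      cases hg : d.get? p.2 with
      | none => rw [PySem.Dict.contains_eq_isSome_get?, hg] at hc; simp at hc
      | some u => simp [hg]
  · simp [hc]

theorem aStep_nodup (y : List Int) (d : PySem.Dict Int Int) (p : Int × Int)
    (hnd : d.keys.Nodup) : (aStep y d p).keys.Nodup := by
  unfold aStep; split <;> exact PySem.Dict.nodup_keys_insert _ _ _ hnd

theorem fold_eq (y : List Int) : ∀ (l : List (Int × Int)) (d : PySem.Dict Int Int), d.keys.Nodup →
    l.foldl (aStep y) d = l.foldl (fun d p => bStep d (p.2, PySem.List.pyGetD y p.1 0)) d := by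
  intro l
  induction l with
  | nil => intro d _; rfl
  | cons p t ih =>
    intro d hnd
    rw [List.foldl_cons, List.foldl_cons, ← step_eq y d p hnd]
    exact ih _ (aStep_nodup y d p hnd)

theorem zip_eq_enum_map (y : List Int) : ∀ (x : List Int) (s : Nat), s + x.length ≤ y.length →
    x.zip (y.drop s) =
      (PySem.List.enumerate x (s : Int)).map (fun p => (p.2, PySem.List.pyGetD y p.1 0)) := by
  intro x
  induction x with
  | nil => intro s h; simp [PySem.List.enumerate]
  | cons n t ih =>
    intro s h
    simp only [List.length_cons] at h
    have hs : s < y.length := by omega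
    rw [List.drop_eq_getElem_cons hs, List.zip_cons_cons, PySem.List.enumerate_cons, List.map_cons]
    have h1 : PySem.List.pyGetD y ((s : Nat) : Int) 0 = y[s] := by
      rw [PySem.List.pyGetD_natCast]; exact List.getD_eq_getElem y 0 hs
    have h2 : ((s : Int) + 1) = (((s + 1 : Nat)) : Int) := by push_cast; ring
    rw [h2, ← ih (s+1) (by omega)]
    simp [h1]

theorem dicts_eq (x y : List Int) (h : x.length ≤ y.length) :
    (PySem.List.enumerate x 0).foldl (aStep y) PySem.Dict.empty
      = (x.zip y).foldl bStep PySem.Dict.empty := by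
  have h0 := zip_eq_enum_map y x 0 (by omega)
  simp only [List.drop_zero, Nat.cast_zero] at h0
  rw [h0, List.foldl_map]
  exact fold_eq y _ _ (by simp [PySem.Dict.keys_empty])

theorem afold_size (x y : List Int) :
    ((PySem.List.enumerate x 0).foldl (aStep y) PySem.Dict.empty).size
      = (PySem.Set.ofList x).length := by
  have hf : (aStep y) = (fun (d : PySem.Dict Int Int) (p : Int × Int) =>
      d.insert p.2 (if d.contains p.2 then (if d.getD p.2 0 < PySem.List.pyGetD y p.1 0 then PySem.List.pyGetD y p.1 0 else d.getD p.2 0) else PySem.List.pyGetD y p.1 0)) := by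
    funext d p; unfold aStep pyMax2; by_cases hc : d.contains p.2 <;> simp [hc]
  have hk : ((PySem.List.enumerate x 0).foldl (aStep y) PySem.Dict.empty).keys = PySem.Set.ofList x := by
    rw [hf, PySem.Dict.keys_foldl_insert_key, PySem.Dict.keys_empty, PySem.Set.update_nil_left]
    rw [show (List.map (fun p => p.2) (PySem.List.enumerate x 0)) = x from PySem.List.map_snd_enumerate x 0]
  have : ((PySem.List.enumerate x 0).foldl (aStep y) PySem.Dict.empty).keys.length
      = ((PySem.List.enumerate x 0).foldl (aStep y) PySem.Dict.empty).size := by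
    simp [PySem.Dict.keys, PySem.Dict.size]
  rw [← this, hk]

theorem bfold_keys_sub : ∀ (l : List (Int × Int)) (d : PySem.Dict Int Int), d.keys.Nodup →
    (l.foldl bStep d).keys.Nodup ∧
      ∀ k ∈ (l.foldl bStep d).keys, k ∈ d.keys ∨ k ∈ l.map Prod.fst := by
  intro l
  induction l with
  | nil => intro d h; exact ⟨h, fun k hk => Or.inl hk⟩
  | cons p t ih =>
    intro d hnd
    have hnd' : (bStep d p).keys.Nodup := by
      unfold bStep; split
      · exact PySem.Dict.nodup_keys_insert _ _ _ hnd
      · exact hnd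
    have hsub : ∀ k ∈ (bStep d p).keys, k ∈ d.keys ∨ k = p.1 := by
      intro k hk
      unfold bStep at hk; split at hk
      · rcases (PySem.Dict.mem_keys_insert _ _ _ _).1 hk with h | h
        · exact Or.inr h
        · exact Or.inl h
      · exact Or.inl hk
    obtain ⟨h1, h2⟩ := ih (bStep d p) hnd'
    refine ⟨h1, fun k hk => ?_⟩
    rcases h2 k hk with h | h
    · rcases hsub k h with h' | h'
      · exact Or.inl h'
      · exact Or.inr (by simp [h'])
    · exact Or.inr (by simp [h])

theorem ofList_length_eq_card (x : List Int) :
    (PySem.Set.ofList x).length = x.toFinset.card := by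
  rw [← List.toFinset_card_of_nodup (PySem.Set.nodup_ofList x)]
  congr 1
  ext k
  simp [PySem.Set.mem_ofList]

theorem bfold_size_lt (x y : List Int) (h : (PySem.Set.ofList x).length < 3) :
    ((x.zip y).foldl bStep PySem.Dict.empty).size < 3 := by
  obtain ⟨hnd, hsub⟩ := bfold_keys_sub (x.zip y) PySem.Dict.empty (by simp [PySem.Dict.keys_empty])
  set d := (x.zip y).foldl bStep PySem.Dict.empty
  have hsz : d.size = d.keys.length := by simp [PySem.Dict.keys, PySem.Dict.size]
  have hcard : d.keys.length = d.keys.toFinset.card := (List.toFinset_card_of_nodup hnd).symm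
  have hss : d.keys.toFinset ⊆ x.toFinset := by
    intro k hk
    simp only [List.mem_toFinset] at *
    rcases hsub k hk with h' | h'
    · simp [PySem.Dict.keys_empty] at h'
    · rcases List.mem_map.1 h' with ⟨p, hp, rfl⟩
      exact (List.of_mem_zip hp).1
  have := Finset.card_le_card hss
  rw [ofList_length_eq_card] at h
  omega

theorem perm_helper (s1 s2 rest : List Int) (v : Int) (h : (s1 ++ [v]).Perm s2) :
    ((s1 ++ rest) ++ [v]).Perm (s2 ++ rest) := by
  have e1 : (s1 ++ rest) ++ [v] = s1 ++ (rest ++ [v]) := by rw [List.append_assoc]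
  have e2 : s1 ++ ([v] ++ rest) = (s1 ++ [v]) ++ rest := by rw [List.append_assoc]
  rw [e1]
  exact ((List.perm_append_comm.append_left s1).trans (e2 ▸ (h.append_right rest) : (s1 ++ ([v] ++ rest)).Perm (s2 ++ rest)))

theorem rest_nil {m stl rest : List Int} (hm : m.Perm (stl ++ rest))
    (hlen : stl.length = min m.length 3) (hlt : stl.length < 3) : rest = [] := by
  have := hm.length_eq
  simp only [List.length_append] at this
  have : rest.length = 0 := by omega
  exact List.length_eq_zero_iff.mp this

theorem inv_step (m : List Int) (st : Option Int × Option Int × Option Int) (v : Int)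
    (h : TInv m st) : TInv (m ++ [v]) (top3Step st v) := by
  obtain ⟨oa, ob, oc⟩ := st
  obtain ⟨h1, h2, hlen, hpw, rest, hm, hbd⟩ := h
  simp only [stL] at hlen hpw hm hbd
  rcases oa with _ | a
  · rcases ob with _ | b
    · rcases oc with _ | c
      · -- shape (none, none, none): m = []
        simp only [List.filterMap] at hlen hm
        have hm0 : m = [] := List.length_eq_zero_iff.mp (by simp at hlen; omega)
        subst hm0
        refine ⟨by simp [top3Step], by simp [top3Step], ?_, ?_, [], ?_, by simp⟩
        · simp [top3Step, stL]
        · simp [top3Step, stL]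
        · simp [top3Step, stL]
      · simp at h2
    · simp at h1
  · rcases ob with _ | b
    · rcases oc with _ | c
      · -- shape (some a, none, none)
        simp only [List.filterMap_cons, id_eq, List.filterMap_nil] at hlen hpw hm hbd
        have hr : rest = [] := rest_nil hm hlen (by simp)
        subst hr
        have hm1 : m.length = 1 := by have := hm.length_eq; simp at this ⊢; omega
        by_cases hav : a < v
        · refine ⟨by simp [top3Step, hav], by simp [top3Step, hav], ?_, ?_, [], ?_, by simp⟩
          · simp [top3Step, hav, stL]; omega
          · simp [top3Step, hav, stL]; omega
          · simp only [top3Step, hav, decide_true, if_pos, stL, List.filterMap_cons, id_eq, List.filterMap_nil]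
            exact (hm.append_right [v]).trans (perm_helper [a] [v, a] [] v List.perm_append_comm)
        · refine ⟨by simp [top3Step, hav], by simp [top3Step, hav], ?_, ?_, [], ?_, by simp⟩
          · simp [top3Step, hav, stL]; omega
          · simp [top3Step, hav, stL]; omega
          · simp only [top3Step, hav, decide_false, Bool.false_eq_true, if_neg, if_pos, stL, List.filterMap_cons, id_eq, List.filterMap_nil]
            exact (hm.append_right [v]).trans (perm_helper [a] [a, v] [] v (List.Perm.refl _))
      · simp at h2
    · rcases oc with _ | c
      · -- shape (some a, some b, none)
        simp only [List.filterMap_cons, id_eq, List.filterMap_nil] at hlen hpw hm hbd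
        have hr : rest = [] := rest_nil hm hlen (by simp)
        subst hr
        have hm2 : m.length = 2 := by have := hm.length_eq; simp at this ⊢; omega
        have hba : b ≤ a := by simp at hpw; omega
        by_cases hav : a < v
        · refine ⟨by simp [top3Step, hav], by simp [top3Step, hav], ?_, ?_, [], ?_, by simp⟩
          · simp [top3Step, hav, stL]; omega
          · simp [top3Step, hav, stL]; constructor <;> omega
          · simp only [top3Step, hav, decide_true, if_pos, stL, List.filterMap_cons, id_eq, List.filterMap_nil]
            exact (hm.append_right [v]).trans (perm_helper [a, b] [v, a, b] [] v List.perm_append_comm)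
        · by_cases hbv : b < v
          · refine ⟨by simp [top3Step, hav, hbv], by simp [top3Step, hav, hbv], ?_, ?_, [], ?_, by simp⟩
            · simp [top3Step, hav, hbv, stL]; omega
            · simp [top3Step, hav, hbv, stL]; constructor <;> omega
            · simp only [top3Step, hav, hbv, decide_true, decide_false, Bool.false_eq_true,
                if_neg, if_pos, stL, List.filterMap_cons, id_eq, List.filterMap_nil]
              exact (hm.append_right [v]).trans (perm_helper [a, b] [a, v, b] [] v
                (List.Perm.cons a List.perm_append_comm))
          · refine ⟨by simp [top3Step, hav, hbv], by simp [top3Step, hav, hbv], ?_, ?_, [], ?_, by simp⟩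
            · simp [top3Step, hav, hbv, stL]; omega
            · simp [top3Step, hav, hbv, stL]; constructor <;> omega
            · simp only [top3Step, hav, hbv, decide_false, Bool.false_eq_true, if_neg, if_pos, stL, List.filterMap_cons, id_eq, List.filterMap_nil]
              exact (hm.append_right [v]).trans (perm_helper [a, b] [a, b, v] [] v (List.Perm.refl _))
      · -- shape (some a, some b, some c)
        simp only [List.filterMap_cons, id_eq, List.filterMap_nil] at hlen hpw hm hbd
        have hm3 : 3 ≤ m.length := by have := hm.length_eq; simp at this; omega
        have hba : b ≤ a := by simp at hpw; omega
        have hcb : c ≤ b := by simp at hpw; omega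
        have hca : c ≤ a := by omega
        by_cases hav : a < v
        · refine ⟨by simp [top3Step, hav], by simp [top3Step, hav], ?_, ?_, c :: rest, ?_, ?_⟩
          · simp [top3Step, hav, stL]; omega
          · simp [top3Step, hav, stL]; constructor <;> omega
          · simp only [top3Step, hav, decide_true, if_pos, stL, List.filterMap_cons, id_eq, List.filterMap_nil]
            have := (hm.append_right [v]).trans (perm_helper [a, b, c] [v, a, b, c] rest v List.perm_append_comm)
            simpa using this
          · intro r hr e he
            simp [top3Step, hav, stL] at he
            rcases List.mem_cons.1 hr with rfl | hr
            · rcases he with rfl | rfl | rfl <;> omega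
            · have h1 := hbd r hr a (by simp)
              have h2 := hbd r hr b (by simp)
              rcases he with rfl | rfl | rfl <;> omega
        · by_cases hbv : b < v
          · refine ⟨by simp [top3Step, hav, hbv], by simp [top3Step, hav, hbv], ?_, ?_, c :: rest, ?_, ?_⟩
            · simp [top3Step, hav, hbv, stL]; omega
            · simp [top3Step, hav, hbv, stL]; constructor <;> omega
            · simp only [top3Step, hav, hbv, decide_true, decide_false, Bool.false_eq_true, if_neg,
                if_pos, stL, List.filterMap_cons, id_eq, List.filterMap_nil]
              have := (hm.append_right [v]).trans (perm_helper [a, b, c] [a, v, b, c] rest v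
                (List.Perm.cons a List.perm_append_comm))
              simpa using this
            · intro r hr e he
              simp [top3Step, hav, hbv, stL] at he
              rcases List.mem_cons.1 hr with rfl | hr
              · rcases he with rfl | rfl | rfl <;> omega
              · have h1 := hbd r hr a (by simp)
                have h2 := hbd r hr b (by simp)
                rcases he with rfl | rfl | rfl <;> omega
          · by_cases hcv : c < v
            · refine ⟨by simp [top3Step, hav, hbv, hcv], by simp [top3Step, hav, hbv, hcv], ?_, ?_, c :: rest, ?_, ?_⟩
              · simp [top3Step, hav, hbv, hcv, stL]; omega
              · simp [top3Step, hav, hbv, hcv, stL]; constructor <;> omega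
              · simp only [top3Step, hav, hbv, hcv, decide_true, decide_false, Bool.false_eq_true,
                  if_neg, if_pos, stL, List.filterMap_cons, id_eq, List.filterMap_nil]
                have := (hm.append_right [v]).trans (perm_helper [a, b, c] [a, b, v, c] rest v
                  (List.Perm.cons a (List.Perm.cons b List.perm_append_comm)))
                simpa using this
              · intro r hr e he
                simp [top3Step, hav, hbv, hcv, stL] at he
                rcases List.mem_cons.1 hr with rfl | hr
                · rcases he with rfl | rfl | rfl <;> omega
                · have h1 := hbd r hr a (by simp)
                  have h2 := hbd r hr b (by simp)
                  have h3 := hbd r hr c (by simp)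
                  rcases he with rfl | rfl | rfl <;> omega
            · refine ⟨by simp [top3Step, hav, hbv, hcv], by simp [top3Step, hav, hbv, hcv], ?_, ?_, v :: rest, ?_, ?_⟩
              · simp [top3Step, hav, hbv, hcv, stL]; omega
              · simp [top3Step, hav, hbv, hcv, stL]; constructor <;> omega
              · simp only [top3Step, hav, hbv, hcv, decide_false, Bool.false_eq_true, if_neg, stL, List.filterMap_cons, id_eq, List.filterMap_nil]
                have := (hm.append_right [v]).trans (perm_helper [a, b, c] [a, b, c, v] rest v (List.Perm.refl _))
                simpa using this
              · intro r hr e he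
                simp [top3Step, hav, hbv, hcv, stL] at he
                rcases List.mem_cons.1 hr with rfl | hr
                · rcases he with rfl | rfl | rfl <;> omega
                · have h1 := hbd r hr a (by simp)
                  have h2 := hbd r hr b (by simp)
                  have h3 := hbd r hr c (by simp)
                  rcases he with rfl | rfl | rfl <;> omega

theorem inv_fold (l : List Int) : ∀ (m : List Int) (st : Option Int × Option Int × Option Int),
    TInv m st → TInv (m ++ l) (l.foldl top3Step st) := by
  induction l with
  | nil => intro m st h; simpa using h
  | cons v t ih => intro m st h
                   have := ih (m ++ [v]) (top3Step st v) (inv_step m st v h)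
                   simpa using this

theorem pyGetD_top1 (s : List Int) (a b c : Int) : PySem.List.pyGetD (s ++ [c, b, a]) (-1) 0 = a := by
  simp [PySem.List.pyGetD, PySem.List.pyGet?, PySem.List.pyIdx?]

theorem pyGetD_top2 (s : List Int) (a b c : Int) : PySem.List.pyGetD (s ++ [c, b, a]) (-2) 0 = b := by
  simp [PySem.List.pyGetD, PySem.List.pyGet?, PySem.List.pyIdx?]

theorem pyGetD_top3 (s : List Int) (a b c : Int) : PySem.List.pyGetD (s ++ [c, b, a]) (-3) 0 = c := by
  simp [PySem.List.pyGetD, PySem.List.pyGet?, PySem.List.pyIdx?]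

theorem main_sum (vs : List Int) (h3 : 3 ≤ vs.length) :
    (let mv := PySem.List.sorted vs (fun v => v) false
     PySem.List.pyGetD mv (-1) 0 + PySem.List.pyGetD mv (-2) 0 + PySem.List.pyGetD mv (-3) 0)
    = (let st := vs.foldl top3Step (none, none, none)
       st.1.getD 0 + st.2.1.getD 0 + st.2.2.getD 0) := by
  have hInv : TInv vs (vs.foldl top3Step (none, none, none)) := by
    have := inv_fold vs [] (none, none, none)
      ⟨by simp, by simp, by simp [stL], by simp [stL], [], by simp [stL], by simp⟩
    simpa using this
  obtain ⟨hs1, hs2, hlen, hpw, rest, hm, hbd⟩ := hInv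
  set st := vs.foldl top3Step (none, none, none) with hst
  obtain ⟨oa, ob, oc⟩ := st
  have hlen3 : (stL (oa, ob, oc)).length = 3 := by rw [hlen]; omega
  rcases oa with _ | a
  · rcases ob with _ | b
    · rcases oc with _ | c
      · simp [stL] at hlen3
      · simp at hs2
    · simp at hs1
  · rcases ob with _ | b
    · rcases oc with _ | c
      · simp [stL] at hlen3
      · simp at hs2
    · rcases oc with _ | c
      · simp [stL] at hlen3
      · -- st = (some a, some b, some c)
        simp only [stL, List.filterMap_cons, id_eq, List.filterMap_nil] at hpw hm hbd
        have hba : b ≤ a := by simp at hpw; omega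
        have hcb : c ≤ b := by simp at hpw; omega
        have hsorted : PySem.List.sorted vs (fun v => v) false
            = (PySem.List.sorted rest (fun v => v) false) ++ [c, b, a] := by
          apply PySem.List.sorted_id_eq_of_perm_of_pairwise
          · refine ((PySem.List.sorted_perm rest _ _).append_right _).trans ?_
            refine (List.perm_append_comm).trans ?_
            refine (List.Perm.append_right rest ?_).trans hm.symm
            exact (by simpa using List.reverse_perm [a, b, c] : ([c, b, a] : List Int).Perm [a, b, c])
          · rw [List.pairwise_append]
            refine ⟨PySem.List.sorted_pairwise rest (fun v => v), by simp; omega, ?_⟩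
            intro e he e' he'
            have her : e ∈ rest := (PySem.List.mem_sorted rest _ _ e).1 he
            have h1 := hbd e her a (by simp)
            have h2 := hbd e her b (by simp)
            have h3' := hbd e her c (by simp)
            simp at he'
            rcases he' with rfl | rfl | rfl <;> omega
        simp only [hsorted, pyGetD_top1, pyGetD_top2, pyGetD_top3]
        simp

-- ===== VERDICT (by name: the statement is the Claim_ definition above) =====
theorem maxSumDistinctTriplet_spec : Claim_equal_maxSumDistinctTriplet := by
  intro x y _ hpre
  unfold Spec_maxSumDistinctTriplet maxSumDistinctTriplet maxSumDistinctTriplet_alt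
  by_cases hlt : (PySem.Set.ofList x).length < 3
  · rw [if_pos hlt, if_pos (bfold_size_lt x y hlt)]
  · have h3 : 3 ≤ (PySem.Set.ofList x).length := by omega
    have hxy := hpre h3
    rw [if_neg hlt, ← dicts_eq x y hxy]
    have hsz := afold_size x y
    have hvl : ((PySem.List.enumerate x 0).foldl (aStep y) PySem.Dict.empty).values.length
        = ((PySem.List.enumerate x 0).foldl (aStep y) PySem.Dict.empty).size := by
      simp [PySem.Dict.values, PySem.Dict.size]
    rw [if_neg (by omega)]
    exact main_sum _ (by omega)
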